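-- pv_equiv track=rewrite | github.com/Gyuminn/Algorithm | programmers/lv2_위장.py | solution
-- ===== SOURCE A (Python) =====
-- def solution(clothes):
--     cloth_dict = {}
--
--     for name, category in clothes:
--         if category not in cloth_dict:
--             cloth_dict[category] = []
--
--         cloth_dict[category].append(name)
--
--     cnt = 1
--
--     for key, value in cloth_dict.items():
--         cnt *= len(value) + 1
--
--     return cnt - 1
-- ===== SOURCE B (Python) =====
-- def solution(clothes):
--     ordered = sorted(clothes, key=lambda c: c[1])
--     if not ordered:
--         return 0
--     acc = 1
--     cur = ordered[0][1]
--     run = 1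
--     for _, cat in ordered[1:]:
--         if cat == cur:
--             run += 1
--         else:
--             acc *= run + 1
--             cur, run = cat, 1
--     acc *= run + 1
--     return acc - 1
-- ===== Notes on version B (the rewrite author's own statement) =====
-- stated objective: alternative
-- what changed: Replaces the hash-index (dict of per-category name lists, then a product over its items) by a sort-then-scan: sort a copy by category and sweep once over consecutive equal-category runs, maintaining only a running product and the current run length.
import Mathlib
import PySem

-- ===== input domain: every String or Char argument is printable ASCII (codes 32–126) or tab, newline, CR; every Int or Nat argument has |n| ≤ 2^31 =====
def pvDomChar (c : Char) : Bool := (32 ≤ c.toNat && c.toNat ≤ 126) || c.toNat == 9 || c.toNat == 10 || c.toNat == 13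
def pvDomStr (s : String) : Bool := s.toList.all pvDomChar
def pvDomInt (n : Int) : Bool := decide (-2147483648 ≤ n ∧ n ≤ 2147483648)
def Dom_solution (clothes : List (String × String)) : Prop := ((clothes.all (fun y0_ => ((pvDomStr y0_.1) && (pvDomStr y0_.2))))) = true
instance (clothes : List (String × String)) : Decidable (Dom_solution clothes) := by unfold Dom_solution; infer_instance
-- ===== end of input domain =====

-- B replaces A's dict-of-lists index by a sort-then-scan over consecutive equal-category runs (alternative decomposition, same result).

-- ===== PORT A =====
def solution (clothes : List (String × String)) : Int :=
  let cloth_dict := clothes.foldl (fun d p =>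
      let d := if d.contains p.2 then d else d.insert p.2 ([] : List String)
      d.modify p.2 [] (fun v => v ++ [p.1])) PySem.Dict.empty
  let cnt := cloth_dict.items.foldl (fun cnt kv => cnt * ((kv.2.length : Int) + 1)) 1
  cnt - 1

-- ===== PORT B =====
-- the scan over ordered[1:] with state (acc, cur, run)
def grpLoop : List (String × String) → Int → String → Int → Int
  | [], acc, _, run => acc * (run + 1)
  | x :: xs, acc, cur, run =>
      if x.2 = cur then grpLoop xs acc cur (run + 1)
      else grpLoop xs (acc * (run + 1)) x.2 1

def solution_alt (clothes : List (String × String)) : Int :=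
  match PySem.List.sorted clothes (fun c => c.2) false with
  | [] => 0
  | x :: xs => grpLoop xs 1 x.2 1 - 1

-- ===== PRECONDITION & SPEC =====
def Spec_solution (clothes : List (String × String)) (out : Int) : Prop := out = solution_alt clothes
instance (clothes : List (String × String)) (out : Int) : Decidable (Spec_solution clothes out) := by unfold Spec_solution; infer_instance

-- ===== CLAIM (what is proved, stated in full; the proofs are below) =====
def Claim_equal_solution : Prop := ∀ (clothes : List (String × String)), Dom_solution clothes → Spec_solution clothes (solution clothes)

-- ===== LEMMAS AND PROOFS =====

-- ∏_{c ∈ distinct categories of K} (count c K + 1), and the same omitting c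
def PP (K : List String) : Int :=
  ((PySem.Set.ofList K).map (fun k => (K.count k : Int) + 1)).prod
def PPex (K : List String) (c : String) : Int :=
  (((PySem.Set.ofList K).discard c).map (fun k => (K.count k : Int) + 1)).prod

theorem count_cons_ne {K : List String} {a k : String} (h : k ≠ a) :
    (a :: K).count k = K.count k := by
  simp [Ne.symm h]

theorem PP_cons (a : String) (K : List String) :
    PP (a :: K) = ((K.count a : Int) + 2) * PPex K a := by
  unfold PP PPex
  rw [PySem.Set.ofList_cons, List.map_cons, List.prod_cons]
  have h1 : ((a :: K).count a : Int) + 1 = (K.count a : Int) + 2 := by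
    simp; ring
  rw [h1]
  have hmap : List.map (fun k => (((a :: K).count k : Int)) + 1) ((PySem.Set.ofList K).discard a)
      = List.map (fun k => ((K.count k : Int)) + 1) ((PySem.Set.ofList K).discard a) :=
    List.map_congr_left (fun k hk => by
      rw [count_cons_ne ((PySem.Set.mem_discard _ a k).mp hk).2])
  rw [hmap]

theorem PPex_cons_self (c : String) (K : List String) :
    PPex (c :: K) c = PPex K c := by
  unfold PPex
  rw [PySem.Set.ofList_cons]
  have hd : PySem.Set.discard ((c :: (PySem.Set.ofList K).discard c) : PySem.Set String) c
      = (PySem.Set.ofList K).discard c := by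
    show ((c :: (PySem.Set.ofList K).discard c) : List String).filter (fun y => !y == c) = _
    rw [List.filter_cons]
    simp only [beq_self_eq_true, Bool.not_true, Bool.false_eq_true, if_false]
    exact List.filter_eq_self.mpr (fun y hy => by
      simp [((PySem.Set.mem_discard _ c y).mp hy).2])
  rw [hd]
  have hmap : List.map (fun k => (((c :: K).count k : Int)) + 1) ((PySem.Set.ofList K).discard c)
      = List.map (fun k => ((K.count k : Int)) + 1) ((PySem.Set.ofList K).discard c) :=
    List.map_congr_left (fun k hk => by
      rw [count_cons_ne ((PySem.Set.mem_discard _ c k).mp hk).2])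
  rw [hmap]

theorem PPex_of_not_mem {K : List String} {c : String} (h : c ∉ K) :
    PPex K c = PP K := by
  unfold PP PPex
  have hd : (PySem.Set.ofList K).discard c = PySem.Set.ofList K := by
    show ((PySem.Set.ofList K) : List String).filter (fun y => !y == c) = PySem.Set.ofList K
    apply List.filter_eq_self.mpr
    intro k hk
    have hkK : k ∈ K := (PySem.Set.mem_ofList K k).mp hk
    have : k ≠ c := fun e => h (e ▸ hkK)
    simp [this]
  rw [hd]

theorem PP_perm {K K' : List String} (h : K.Perm K') : PP K = PP K' := by
  unfold PP
  have hperm : (PySem.Set.ofList K).Perm (PySem.Set.ofList K') := by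
    rw [List.perm_ext_iff_of_nodup (PySem.Set.nodup_ofList K) (PySem.Set.nodup_ofList K')]
    intro a
    rw [PySem.Set.mem_ofList, PySem.Set.mem_ofList]
    exact ⟨fun m => h.mem_iff.mp m, fun m => h.mem_iff.mpr m⟩
  have hmap : ((PySem.Set.ofList K).map (fun k => (K.count k : Int) + 1)).Perm
      ((PySem.Set.ofList K').map (fun k => (K.count k : Int) + 1)) := hperm.map _
  rw [hmap.prod_eq]
  congr 1
  apply List.map_congr_left
  intro k _
  rw [h.count_eq]

-- B-side scan invariant
theorem grpLoop_spec : ∀ (xs : List (String × String)) (acc : Int) (c : String) (n : Int),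
    (xs.map (fun p => p.2)).Pairwise (· ≤ ·) → (∀ y ∈ xs, c ≤ y.2) →
    grpLoop xs acc c n = acc * ((n + ((xs.map (fun p => p.2)).count c : Int) + 1) * PPex (xs.map (fun p => p.2)) c) := by
  intro xs
  induction xs with
  | nil => intro acc c n _ _; simp [grpLoop, PPex, PySem.Set.ofList]
  | cons x xs ih =>
    intro acc c n hpw hlb
    rw [List.map_cons] at hpw ⊢
    have hpw' := hpw.of_cons
    have hhead : ∀ y ∈ xs, x.2 ≤ y.2 := by
      intro y hy
      exact (List.pairwise_cons.mp hpw).1 _ (List.mem_map_of_mem hy)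
    by_cases hx : x.2 = c
    · rw [grpLoop, if_pos hx]
      have hlb' : ∀ y ∈ xs, c ≤ y.2 := fun y hy => hx ▸ hhead y hy
      rw [ih acc c (n + 1) hpw' hlb', hx, PPex_cons_self]
      have : ((c :: xs.map (fun p => p.2)).count c : Int) = ((xs.map (fun p => p.2)).count c : Int) + 1 := by
        simp
      rw [this]; ring
    · rw [grpLoop, if_neg hx]
      have hclt : c < x.2 := lt_of_le_of_ne (hlb x (List.mem_cons_self)) (fun e => hx e.symm)
      have hcnot : c ∉ x.2 :: xs.map (fun p => p.2) := by
        intro hmem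
        rcases List.mem_cons.mp hmem with h | h
        · exact absurd h (ne_of_lt hclt)
        · rcases List.mem_map.mp h with ⟨y, hy, hey⟩
          have := lt_of_lt_of_le hclt (hhead y hy)
          exact absurd hey (ne_of_gt this)
      rw [ih (acc * (n + 1)) x.2 1 hpw' hhead]
      have hcnt0 : (x.2 :: xs.map (fun p => p.2)).count c = 0 :=
        List.count_eq_zero.mpr hcnot
      rw [PPex_of_not_mem (fun h => hcnot h), hcnt0, PP_cons]
      push_cast; ring

-- A-side: the loop body is a plain modify
theorem Astep_eq (d : PySem.Dict String (List String)) (p : String × String) :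
    (let d' := if d.contains p.2 then d else d.insert p.2 ([] : List String)
     d'.modify p.2 [] (fun v => v ++ [p.1])) = d.modify p.2 [] (fun v => v ++ [p.1]) := by
  by_cases h : d.contains p.2
  · simp [h]
  · simp only [h, Bool.false_eq_true, ite_false]
    show (d.insert p.2 []).modify p.2 [] (fun v => v ++ [p.1]) = _
    unfold PySem.Dict.modify
    rw [PySem.Dict.getD_insert_self, PySem.Dict.insert_insert_self,
        PySem.Dict.getD_of_not_contains _ _ (by simpa using h)]

-- foldl-by-multiplication is a product
theorem foldl_mul (l : List (String × List String)) (a : Int) :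
    l.foldl (fun cnt kv => cnt * ((kv.2.length : Int) + 1)) a
      = a * (l.map (fun kv => ((kv.2.length : Int) + 1))).prod := by
  induction l generalizing a with
  | nil => simp
  | cons x xs ih => simp [List.foldl_cons, ih]; ring

theorem solution_eq_PP (clothes : List (String × String)) :
    solution clothes = PP (clothes.map (fun p => p.2)) - 1 := by
  unfold solution
  have hstep : (clothes.foldl (fun d p =>
      let d := if d.contains p.2 then d else d.insert p.2 ([] : List String)
      d.modify p.2 [] (fun v => v ++ [p.1])) PySem.Dict.empty)
      = clothes.foldl (fun d p => d.modify p.2 [] (fun v => v ++ [p.1])) PySem.Dict.empty := by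
    have hf : (fun (d : PySem.Dict String (List String)) (p : String × String) =>
        let d' := if d.contains p.2 then d else d.insert p.2 ([] : List String)
        d'.modify p.2 [] (fun v => v ++ [p.1]))
        = fun d p => d.modify p.2 [] (fun v => v ++ [p.1]) :=
      funext fun d => funext fun p => Astep_eq d p
    rw [hf]
  rw [hstep]
  set D := clothes.foldl (fun d p => d.modify p.2 [] (fun v => v ++ [p.1])) PySem.Dict.empty with hD
  have hkeys : D.keys = PySem.Set.ofList (clothes.map (fun p => p.2)) := by
    rw [hD, PySem.Dict.keys_foldl_modify_key clothes (fun p => p.2) ([] : List String)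
          (fun _ p v => v ++ [p.1]) PySem.Dict.empty]
    simp [PySem.Set.update_nil_left, PySem.Dict.keys_empty]
  have hnd : D.keys.Nodup := by
    rw [hD]
    exact PySem.Dict.nodup_keys_foldl_modify_key clothes (fun p => p.2) ([] : List String)
      (fun _ p v => v ++ [p.1]) PySem.Dict.empty (by simp [PySem.Dict.keys_empty])
  have hgetD : ∀ c : String, D.getD c [] =
      ((clothes.map (fun p => (p.2, p.1))).filter (fun q => q.1 == c)).map (fun q => q.2) := by
    intro c
    have := PySem.Dict.getD_foldl_modify_append (clothes.map (fun p => (p.2, p.1)))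
      PySem.Dict.empty c
    rw [List.foldl_map] at this
    simpa [hD, PySem.Dict.getD_empty] using this
  have hlen : ∀ c : String, (D.getD c []).length = (clothes.map (fun p => p.2)).count c := by
    intro c
    rw [hgetD c, List.length_map, ← List.countP_eq_length_filter, List.countP_map,
        List.count_eq_countP, List.countP_map]
    rfl
  show D.items.foldl (fun cnt kv => cnt * ((kv.2.length : Int) + 1)) 1 - 1 = _
  rw [PySem.Dict.items_eq_map_keys D hnd ([] : List String), foldl_mul, List.map_map]
  have hmap : D.keys.map ((fun kv : String × List String => ((kv.2.length : Int) + 1)) ∘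
        (fun k => (k, D.getD k [])))
      = (PySem.Set.ofList (clothes.map (fun p => p.2))).map
          (fun k => (((clothes.map (fun p => p.2)).count k : Int) + 1)) := by
    rw [hkeys]
    exact List.map_congr_left (fun k _ => by simp [hlen k])
  rw [hmap]
  unfold PP
  ring

theorem solution_alt_eq_PP (clothes : List (String × String)) :
    solution_alt clothes = PP ((PySem.List.sorted clothes (fun c => c.2) false).map (fun p => p.2)) - 1 := by
  unfold solution_alt
  cases hs : PySem.List.sorted clothes (fun c => c.2) false with
  | nil => simp [PP, PySem.Set.ofList]
  | cons x xs =>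
    show grpLoop xs 1 x.2 1 - 1 = _
    have hpw : ((x :: xs).map (fun p => p.2)).Pairwise (· ≤ ·) := by
      have := PySem.List.sorted_pairwise clothes (fun c => c.2)
      rw [hs] at this
      exact List.pairwise_map.mpr this
    have hhead : ∀ y ∈ xs, x.2 ≤ y.2 := by
      rw [List.map_cons] at hpw
      intro y hy
      exact (List.pairwise_cons.mp hpw).1 _ (List.mem_map_of_mem hy)
    rw [grpLoop_spec xs 1 x.2 1 (by rw [List.map_cons] at hpw; exact hpw.of_cons) hhead]
    rw [List.map_cons, PP_cons]
    have : ((xs.map (fun p => p.2)).count x.2 : Int) + 2 = 1 + ((xs.map (fun p => p.2)).count x.2 : Int) + 1 := by ring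
    rw [this]; ring_nf

-- ===== VERDICT (by name: the statement is the Claim_ definition above) =====
theorem solution_spec : Claim_equal_solution := by
  intro clothes _
  unfold Spec_solution
  rw [solution_eq_PP, solution_alt_eq_PP]
  have hperm : ((PySem.List.sorted clothes (fun c => c.2) false).map (fun p => p.2)).Perm (clothes.map (fun p => p.2)) :=
    (PySem.List.sorted_perm clothes (fun c => c.2) false).map _
  rw [PP_perm hperm]
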